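-- pv_equiv track=rewrite | github.com/gritmind/semantic-annotation | jupyter-notebook/feature_design_for_spaCy.py | numbering_pp_isJustRight_fromNP_sent
-- ===== SOURCE A (Python) =====
-- def numbering_pp_isJustRight_fromNP_sent(npchunk_numbered_sent, ppchunk_numbered_sent): # NP - PP
--
--     pp_isjustright_fromnp = [0] * len(npchunk_numbered_sent)
--     idx_prep = 1
--
--     # Make pp numbered list (which is just right from np)
--     for i, num in enumerate(ppchunk_numbered_sent):
--         if not i == 0: # Boundary Exception: not last token
--             if ppchunk_numbered_sent[i-1] != ppchunk_numbered_sent[i] and ppchunk_numbered_sent[i] != 0: # 앞에와 번호가 다르고, 현재가 pp이어야만 한다.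
--                 if npchunk_numbered_sent[i-1] != 0 and npchunk_numbered_sent[i] == 0: # 바로 전이 np이다. 즉, np right position에 있다.
--                     pp_isjustright_fromnp[i] = idx_prep
--                     for k, num in enumerate(ppchunk_numbered_sent):
--                         if ppchunk_numbered_sent[k] == ppchunk_numbered_sent[i]:
--                             pp_isjustright_fromnp[k] = idx_prep
--                     idx_prep += 1
--
--     return pp_isjustright_fromnp
-- ===== SOURCE B (Python) =====
-- def numbering_pp_isJustRight_fromNP_sent(npchunk_numbered_sent, ppchunk_numbered_sent):
--     # Record, for each pp-chunk number that starts right after an NP,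
--     # its preposition index; then build the whole output by a single lookup pass.
--     label = {}
--     idx_prep = 1
--     for p_prev, p, n_prev, n in zip(ppchunk_numbered_sent, ppchunk_numbered_sent[1:],
--                                     npchunk_numbered_sent, npchunk_numbered_sent[1:]):
--         if p_prev != p and p != 0 and n_prev != 0 and n == 0:
--             label[p] = idx_prep
--             idx_prep += 1
--     res = [label.get(v, 0) for v in ppchunk_numbered_sent]
--     res += [0] * (len(npchunk_numbered_sent) - len(res))
--     return res
-- ===== Notes on version B (the rewrite author's own statement) =====
-- stated objective: alternative
-- what changed: Instead of rescanning the whole pp list to renumber a chunk at every trigger (nested loop), B makes one pass recording each triggered pp-chunk number's preposition index in a dict and then builds the entire output with a single lookup pass.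
-- outside the precondition, e.g. on numbering_pp_isJustRight_fromNP_sent([1], [0, 0, 0]): A returns [0], B returns [0, 0, 0]
import Mathlib
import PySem

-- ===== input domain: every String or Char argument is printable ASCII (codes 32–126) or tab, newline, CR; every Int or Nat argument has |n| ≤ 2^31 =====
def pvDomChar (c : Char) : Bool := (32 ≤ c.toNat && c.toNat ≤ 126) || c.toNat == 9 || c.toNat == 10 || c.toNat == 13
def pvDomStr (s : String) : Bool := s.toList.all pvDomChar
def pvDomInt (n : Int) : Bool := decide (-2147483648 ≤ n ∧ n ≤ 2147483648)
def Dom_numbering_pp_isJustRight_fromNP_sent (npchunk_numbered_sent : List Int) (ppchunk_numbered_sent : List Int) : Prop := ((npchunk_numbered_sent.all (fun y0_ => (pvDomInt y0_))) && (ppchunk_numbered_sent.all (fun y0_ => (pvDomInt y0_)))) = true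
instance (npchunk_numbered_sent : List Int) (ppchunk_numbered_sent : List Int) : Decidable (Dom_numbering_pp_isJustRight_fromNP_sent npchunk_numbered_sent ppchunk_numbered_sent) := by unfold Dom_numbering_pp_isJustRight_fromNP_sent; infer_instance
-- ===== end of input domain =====

-- B replaces A's inner rescan of the whole pp list at every trigger by one dict-building pass
-- plus one lookup pass (objective: alternative algorithm, same observed cost).


-- ===== PORT A =====
-- inner loop: `for k, num in enumerate(pp): if pp[k] == pp[i]: res[k] = idx_prep`
def pvInnerA (pp : List Int) (target idx : Int) : List (Int × Int) → List Int → List Int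
  | [], res => res
  | (k, _num) :: rest, res =>
      pvInnerA pp target idx rest
        (if PySem.List.pyGetD pp k 0 = target then PySem.List.pySetD res k idx else res)

-- outer loop over `enumerate(pp)`, state (res, idx_prep)
def pvOuterA (np pp : List Int) : List (Int × Int) → List Int → Int → List Int
  | [], res, _idx => res
  | (i, _num) :: rest, res, idx =>
      if i ≠ 0 then
        if PySem.List.pyGetD pp (i - 1) 0 ≠ PySem.List.pyGetD pp i 0 ∧ PySem.List.pyGetD pp i 0 ≠ 0 then
          if PySem.List.pyGetD np (i - 1) 0 ≠ 0 ∧ PySem.List.pyGetD np i 0 = 0 then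
            pvOuterA np pp rest
              (pvInnerA pp (PySem.List.pyGetD pp i 0) idx (PySem.List.enumerate pp)
                (PySem.List.pySetD res i idx))
              (idx + 1)
          else pvOuterA np pp rest res idx
        else pvOuterA np pp rest res idx
      else pvOuterA np pp rest res idx

def numbering_pp_isJustRight_fromNP_sent (npchunk_numbered_sent : List Int) (ppchunk_numbered_sent : List Int) : List Int :=
  pvOuterA npchunk_numbered_sent ppchunk_numbered_sent
    (PySem.List.enumerate ppchunk_numbered_sent)
    (List.replicate npchunk_numbered_sent.length 0) 1

-- ===== PORT B =====
-- one pass over zip(pp, pp[1:], np, np[1:]) collecting pp-number -> preposition index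
def pvCollectB : List (Int × Int × Int × Int) → PySem.Dict Int Int → Int → PySem.Dict Int Int
  | [], label, _idx => label
  | (pprev, p, nprev, n) :: rest, label, idx =>
      if pprev ≠ p ∧ p ≠ 0 ∧ nprev ≠ 0 ∧ n = 0 then
        pvCollectB rest (label.insert p idx) (idx + 1)
      else pvCollectB rest label idx

def numbering_pp_isJustRight_fromNP_sent_alt (npchunk_numbered_sent : List Int) (ppchunk_numbered_sent : List Int) : List Int :=
  -- pp[1:] / np[1:] are List.drop 1 (exact for this slice); zip truncates like Python's zip
  let rows := ppchunk_numbered_sent.zip ((ppchunk_numbered_sent.drop 1).zip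
                (npchunk_numbered_sent.zip (npchunk_numbered_sent.drop 1)))
  let label := pvCollectB rows PySem.Dict.empty 1
  let res := ppchunk_numbered_sent.map (fun v => label.getD v 0)
  res ++ List.replicate (npchunk_numbered_sent.length - res.length) 0

-- ===== PRECONDITION & SPEC =====
-- Pre_ excludes inputs where ppchunk is longer than npchunk: there A indexes the np list / the
-- result list past the end and raises IndexError as soon as a trigger condition is reached
-- (when no trigger happens to occur A returns a len(np)-sized list by accident of lazy evaluation).
def Pre_numbering_pp_isJustRight_fromNP_sent (npchunk_numbered_sent : List Int) (ppchunk_numbered_sent : List Int) : Prop :=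
  ppchunk_numbered_sent.length ≤ npchunk_numbered_sent.length
instance (npchunk_numbered_sent : List Int) (ppchunk_numbered_sent : List Int) : Decidable (Pre_numbering_pp_isJustRight_fromNP_sent npchunk_numbered_sent ppchunk_numbered_sent) := by unfold Pre_numbering_pp_isJustRight_fromNP_sent; infer_instance

def pvWitness_numbering_pp_isJustRight_fromNP_sent : List Int × List Int := ([1, 0, 2], [0, 3, 3])

def Spec_numbering_pp_isJustRight_fromNP_sent (npchunk_numbered_sent : List Int) (ppchunk_numbered_sent : List Int) (out : List Int) : Prop := out = numbering_pp_isJustRight_fromNP_sent_alt npchunk_numbered_sent ppchunk_numbered_sent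
instance (npchunk_numbered_sent : List Int) (ppchunk_numbered_sent : List Int) (out : List Int) : Decidable (Spec_numbering_pp_isJustRight_fromNP_sent npchunk_numbered_sent ppchunk_numbered_sent out) := by unfold Spec_numbering_pp_isJustRight_fromNP_sent; infer_instance

-- ===== CLAIM (what is proved, stated in full; the proofs are below) =====
def Claim_equal_numbering_pp_isJustRight_fromNP_sent : Prop := ∀ (npchunk_numbered_sent : List Int) (ppchunk_numbered_sent : List Int), Dom_numbering_pp_isJustRight_fromNP_sent npchunk_numbered_sent ppchunk_numbered_sent → Pre_numbering_pp_isJustRight_fromNP_sent npchunk_numbered_sent ppchunk_numbered_sent → Spec_numbering_pp_isJustRight_fromNP_sent npchunk_numbered_sent ppchunk_numbered_sent (numbering_pp_isJustRight_fromNP_sent npchunk_numbered_sent ppchunk_numbered_sent)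

-- ===== LEMMAS AND PROOFS =====

-- B's output seen through getElem?
def pvBView (np pp : List Int) (label : PySem.Dict Int Int) (j : Nat) : Option Int :=
  if j < pp.length then some (label.getD (pp.getD j 0) 0)
  else if j < np.length then some 0 else none

-- B's final assembly as a function of the finished dict
def pvBuild (np pp : List Int) (label : PySem.Dict Int Int) : List Int :=
  pp.map (fun v => label.getD v 0) ++
    List.replicate (np.length - (pp.map (fun v => label.getD v 0)).length) 0

theorem pvBuild_get (np pp : List Int) (label : PySem.Dict Int Int)
    (hmn : pp.length ≤ np.length) (j : Nat) :
    (pvBuild np pp label)[j]? = pvBView np pp label j := by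
  unfold pvBuild pvBView
  rcases lt_or_ge j pp.length with h | h
  · rw [List.getElem?_append_left (by simpa using h)]
    simp [h]
  · rw [List.getElem?_append_right (by simpa using h)]
    simp only [List.length_map, List.getElem?_replicate]
    split_ifs with h1 h2 h3 <;> first | rfl | omega

theorem pvInnerA_length (pp : List Int) (v x : Int) :
    ∀ (e : List (Int × Int)) (res : List Int), (pvInnerA pp v x e res).length = res.length := by
  intro e
  induction e with
  | nil => intro res; rfl
  | cons p rest ih =>
      intro res
      obtain ⟨k, num⟩ := p
      rw [pvInnerA, ih]
      split_ifs <;> simp [PySem.List.length_pySetD]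

theorem pvInnerA_get (pp : List Int) (v x : Int) :
    ∀ (tail : List Int) (s : Nat), pp.drop s = tail →
    ∀ (res : List Int) (j : Nat),
      (pvInnerA pp v x (PySem.List.enumerate tail (s : Int)) res)[j]? =
      if s ≤ j ∧ j < pp.length ∧ pp.getD j 0 = v then res[j]?.map (fun _ => x) else res[j]? := by
  intro tail
  induction tail with
  | nil =>
      intro s hdrop res j
      have hm : pp.length ≤ s := List.drop_eq_nil_iff.mp hdrop
      rw [PySem.List.enumerate_nil, pvInnerA, if_neg (by omega)]
  | cons y rest ih =>
      intro s hdrop res j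
      have hs : s < pp.length := by
        by_contra h
        rw [List.drop_eq_nil_iff.mpr (by omega)] at hdrop; simp at hdrop
      have hrest : pp.drop (s + 1) = rest := by
        have := congrArg (List.drop 1) hdrop
        simpa [List.drop_drop, Nat.add_comm] using this
      rw [PySem.List.enumerate_cons, pvInnerA]
      have hcast : (s : Int) + 1 = ((s + 1 : Nat) : Int) := by push_cast; ring
      rw [hcast, ih (s + 1) hrest]
      rw [PySem.List.pyGetD_natCast, PySem.List.pySetD_natCast]
      by_cases hyv : pp.getD s 0 = v
      · rw [if_pos hyv]
        by_cases hjs : j = s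
        · subst hjs
          rw [if_neg (by omega), if_pos ⟨le_refl _, hs, hyv⟩]
          rcases lt_or_ge j res.length with hl | hl
          · simp [hl]
          · simp [Nat.not_lt.mpr hl]
        · have hset : (res.set s x)[j]? = res[j]? := by
            rw [List.getElem?_set, if_neg (by omega)]
          rw [hset]
          by_cases hc : s ≤ j ∧ j < pp.length ∧ pp.getD j 0 = v
          · rw [if_pos ⟨by omega, hc.2⟩, if_pos hc]
          · rw [if_neg (by intro h; exact hc ⟨by omega, h.2⟩), if_neg hc]
      · rw [if_neg hyv]
        by_cases hc : s ≤ j ∧ j < pp.length ∧ pp.getD j 0 = v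
        · have hc' : s + 1 ≤ j ∧ j < pp.length ∧ pp.getD j 0 = v := by
            refine ⟨?_, hc.2⟩
            rcases Nat.lt_or_ge s j with h | h
            · omega
            · exfalso; have hje : j = s := by omega
              exact hyv (hje ▸ hc.2.2)
          rw [if_pos hc', if_pos hc]
        · rw [if_neg (by intro h; exact hc ⟨by omega, h.2⟩), if_neg hc]

theorem pvRows_drop_cons (np pp : List Int) (hmn : pp.length ≤ np.length)
    (k : Nat) (hk : k + 1 < pp.length) :
    (pp.zip ((pp.drop 1).zip (np.zip (np.drop 1)))).drop k =
      (pp.getD k 0, pp.getD (k+1) 0, np.getD k 0, np.getD (k+1) 0) ::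
        (pp.zip ((pp.drop 1).zip (np.zip (np.drop 1)))).drop (k+1) := by
  have hlen : (pp.zip ((pp.drop 1).zip (np.zip (np.drop 1)))).length = pp.length - 1 := by
    simp [List.length_zip]; omega
  have hkl : k < (pp.zip ((pp.drop 1).zip (np.zip (np.drop 1)))).length := by omega
  rw [List.drop_eq_getElem_cons hkl]
  congr 1
  rw [List.getElem_zip, List.getElem_zip, List.getElem_zip]
  simp [List.getD_eq_getElem?_getD, (by omega : k < pp.length), hk,
    (by omega : k < np.length), (by omega : k + 1 < np.length)]

theorem pvOuterA_eq (np pp : List Int) (hmn : pp.length ≤ np.length) :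
    ∀ (tail : List Int) (i : Nat), 1 ≤ i → pp.drop i = tail →
    ∀ (label : PySem.Dict Int Int) (idx : Int) (res : List Int),
      res.length = np.length →
      (∀ j : Nat, res[j]? = pvBView np pp label j) →
      pvOuterA np pp (PySem.List.enumerate tail (i : Int)) res idx =
        pvBuild np pp
          (pvCollectB ((pp.zip ((pp.drop 1).zip (np.zip (np.drop 1)))).drop (i - 1)) label idx) := by
  intro tail
  induction tail with
  | nil =>
      intro i hi hdrop label idx res hlen hres
      have hm : pp.length ≤ i := List.drop_eq_nil_iff.mp hdrop
      have hrows : (pp.zip ((pp.drop 1).zip (np.zip (np.drop 1)))).drop (i - 1) = [] := by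
        apply List.drop_eq_nil_iff.mpr
        simp [List.length_zip]; omega
      rw [PySem.List.enumerate_nil, pvOuterA, hrows, pvCollectB]
      apply List.ext_getElem?
      intro j
      rw [hres j, pvBuild_get np pp label hmn j]
  | cons y rest ih =>
      intro i hi hdrop label idx res hlen hres
      have him : i < pp.length := by
        by_contra h
        rw [List.drop_eq_nil_iff.mpr (by omega)] at hdrop; simp at hdrop
      have hrest : pp.drop (i + 1) = rest := by
        have := congrArg (List.drop 1) hdrop
        simpa [List.drop_drop, Nat.add_comm] using this
      rw [PySem.List.enumerate_cons, pvOuterA, if_pos (by exact_mod_cast (by omega : (i : Int) ≠ 0))]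
      have hi1 : ((i : Nat) : Int) - 1 = ((i - 1 : Nat) : Int) := by omega
      rw [hi1]
      simp only [PySem.List.pyGetD_natCast]
      rw [pvRows_drop_cons np pp hmn (i - 1) (by omega)]
      have hsub : i - 1 + 1 = i := by omega
      rw [hsub, pvCollectB]
      have hcast : ((i : Nat) : Int) + 1 = ((i + 1 : Nat) : Int) := by push_cast; ring
      by_cases c12 : pp.getD (i-1) 0 ≠ pp.getD i 0 ∧ pp.getD i 0 ≠ 0
      · rw [if_pos c12]
        by_cases c34 : np.getD (i-1) 0 ≠ 0 ∧ np.getD i 0 = 0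
        · rw [if_pos c34, if_pos ⟨c12.1, c12.2, c34.1, c34.2⟩, hcast]
          apply ih (i + 1) (by omega) hrest (label.insert (pp.getD i 0) idx) (idx + 1)
          · rw [pvInnerA_length, PySem.List.pySetD_natCast, List.length_set, hlen]
          · intro j
            have e0 : PySem.List.enumerate pp = PySem.List.enumerate pp (((0 : Nat) : Int)) := by
              norm_num
            rw [e0, pvInnerA_get pp (pp.getD i 0) idx pp 0 (by simp),
              PySem.List.pySetD_natCast]
            by_cases hj : j < pp.length ∧ pp.getD j 0 = pp.getD i 0
            · rw [if_pos ⟨Nat.zero_le _, hj⟩]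
              have hjr : j < (res.set i idx).length := by
                rw [List.length_set, hlen]; omega
              rw [List.getElem?_eq_getElem hjr]
              unfold pvBView
              rw [if_pos hj.1, hj.2]
              simp [PySem.Dict.getD]
            · rw [if_neg (by intro h; exact hj h.2)]
              have hji : j ≠ i := by
                intro h; subst h; exact hj ⟨him, rfl⟩
              rw [List.getElem?_set, if_neg (fun h => hji h.symm), hres j]
              unfold pvBView
              by_cases hjm : j < pp.length
              · have hne : pp.getD j 0 ≠ pp.getD i 0 := fun h => hj ⟨hjm, h⟩
                have hins2 : (label.insert (pp.getD i 0) idx).getD (pp.getD j 0) 0 =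
                    label.getD (pp.getD j 0) 0 := by
                  simp only [PySem.Dict.getD, PySem.Dict.get?_insert]
                  rw [if_neg hne]
                rw [if_pos hjm, if_pos hjm, hins2]
              · simp [hjm]
        · rw [if_neg c34, if_neg (by tauto), hcast]
          exact ih (i + 1) (by omega) hrest label idx res hlen hres
      · rw [if_neg c12, if_neg (by tauto), hcast]
        exact ih (i + 1) (by omega) hrest label idx res hlen hres

-- ===== VERDICT (by name: the statement is the Claim_ definition above) =====
theorem numbering_pp_isJustRight_fromNP_sent_spec : Claim_equal_numbering_pp_isJustRight_fromNP_sent := by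
  intro np pp _hdom hpre
  unfold Spec_numbering_pp_isJustRight_fromNP_sent
  unfold Pre_numbering_pp_isJustRight_fromNP_sent at hpre
  cases pp with
  | nil =>
      simp [numbering_pp_isJustRight_fromNP_sent, numbering_pp_isJustRight_fromNP_sent_alt,
        PySem.List.enumerate_nil, pvOuterA]
  | cons y rest =>
      unfold numbering_pp_isJustRight_fromNP_sent
      rw [PySem.List.enumerate_cons, pvOuterA, if_neg (by norm_num)]
      have h1 : (0 : Int) + 1 = ((1 : Nat) : Int) := by norm_num
      rw [h1, pvOuterA_eq np (y :: rest) hpre rest 1 (le_refl 1) (by simp)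
        PySem.Dict.empty 1 (List.replicate np.length 0) (by simp) ?_]
      · simp [numbering_pp_isJustRight_fromNP_sent_alt, pvBuild]
      · intro j
        unfold pvBView
        rw [List.getElem?_replicate]
        split_ifs with h1 h2 h3 <;> simp_all [PySem.Dict.getD_empty] <;> omega
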